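-- pv_equiv track=rewrite | github.com/ywlee-dot/unified | backend/app/projects/dataset_summary/core.py | _detect_max_cols
-- ===== SOURCE A (Python) =====
-- from typing import Any, Dict, List
--
-- def _detect_max_cols(rows: List[tuple], max_scan: int = 30, min_cols: int = 7) -> int:
--     max_col = 0
--     for row in rows[:max_scan]:
--         last = 0
--         for idx in range(len(row), 0, -1):
--             cell = row[idx - 1]
--             if cell is None or str(cell).strip() == "":
--                 continue
--             last = idx
--             break
--         if last > max_col:
--             max_col = last
--     if max_col < min_cols:
--         return min_cols
--     return max_col
-- ===== SOURCE B (Python) =====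
-- def _detect_max_cols(rows, max_scan=30, min_cols=7):
--     cols = max((i + 1
--                 for row in rows[:max_scan]
--                 for i, c in enumerate(row)
--                 if c is not None and str(c).strip() != ""),
--                default=0)
--     return max(cols, min_cols)
-- ===== Notes on version B (the rewrite author's own statement) =====
-- stated objective: simpler
-- what changed: Replaces A's per-row backward early-exit scan plus running-maximum accumulator with a single flattened forward generator taking the max qualifying 1-based column index over all scanned rows, floored by min_cols via max().
import Mathlib
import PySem

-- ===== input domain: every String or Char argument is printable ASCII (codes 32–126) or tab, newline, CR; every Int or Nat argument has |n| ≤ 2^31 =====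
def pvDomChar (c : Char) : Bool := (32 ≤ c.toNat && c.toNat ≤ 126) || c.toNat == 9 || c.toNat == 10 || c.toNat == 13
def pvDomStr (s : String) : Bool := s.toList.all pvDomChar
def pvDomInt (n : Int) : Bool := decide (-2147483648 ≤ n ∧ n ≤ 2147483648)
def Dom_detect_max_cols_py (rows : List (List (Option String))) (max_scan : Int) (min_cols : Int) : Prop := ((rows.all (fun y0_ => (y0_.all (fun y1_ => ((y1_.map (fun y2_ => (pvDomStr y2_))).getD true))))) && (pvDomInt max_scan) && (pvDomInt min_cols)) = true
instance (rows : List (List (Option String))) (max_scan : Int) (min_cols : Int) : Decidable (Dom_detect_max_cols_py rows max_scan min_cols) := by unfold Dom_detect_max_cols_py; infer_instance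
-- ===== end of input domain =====

-- B replaces A's per-row backward early-exit scan by a single flattened forward
-- comprehension taking the max qualifying 1-based index (objective: simpler).

-- ===== PORT A =====
-- inner loop 'for idx in range(len(row), 0, -1): …' of A, counting idx down from k
def pvLastA (row : List (Option String)) : Nat → Int
  | 0 => 0
  | k + 1 =>
      let cell := PySem.List.pyGetD row (((k : Int) + 1) - 1) none
      match cell with
      | none => pvLastA row k
      | some s => if PySem.Str.strip s == "" then pvLastA row k else (k : Int) + 1

def detect_max_cols_py (rows : List (List (Option String))) (max_scan : Int) (min_cols : Int) : Int :=
  let max_col :=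
    (PySem.List.slice rows none (some max_scan)).foldl
      (fun max_col row =>
        let last := pvLastA row row.length
        if last > max_col then last else max_col) 0
  if max_col < min_cols then min_cols else max_col

-- ===== PORT B =====
-- the per-row part of B's comprehension: qualifying 1-based indices of a row
def pvQual (row : List (Option String)) : List Int :=
  (PySem.List.enumerate row 0).filterMap (fun p =>
    match p.2 with
    | none => none
    | some s => if PySem.Str.strip s == "" then none else some (p.1 + 1))

def detect_max_cols_py_alt (rows : List (List (Option String))) (max_scan : Int) (min_cols : Int) : Int :=
  let cols := ((PySem.List.slice rows none (some max_scan)).flatMap pvQual).foldl max 0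
  max cols min_cols

-- ===== PRECONDITION & SPEC =====
def Spec_detect_max_cols_py (rows : List (List (Option String))) (max_scan : Int) (min_cols : Int) (out : Int) : Prop := out = detect_max_cols_py_alt rows max_scan min_cols
instance (rows : List (List (Option String))) (max_scan : Int) (min_cols : Int) (out : Int) : Decidable (Spec_detect_max_cols_py rows max_scan min_cols out) := by unfold Spec_detect_max_cols_py; infer_instance

-- ===== CLAIM (what is proved, stated in full; the proofs are below) =====
def Claim_equal_detect_max_cols_py : Prop := ∀ (rows : List (List (Option String))) (max_scan : Int) (min_cols : Int), Dom_detect_max_cols_py rows max_scan min_cols → Spec_detect_max_cols_py rows max_scan min_cols (detect_max_cols_py rows max_scan min_cols)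

-- ===== LEMMAS AND PROOFS =====

theorem le_foldl_max (xs : List Int) (m : Int) : m ≤ xs.foldl max m := by
  induction xs generalizing m with
  | nil => simp
  | cons x t ih => exact le_trans (le_max_left m x) (ih (max m x))

theorem foldl_max_shift (xs : List Int) (m : Int) (hm : 0 ≤ m) :
    xs.foldl max m = max m (xs.foldl max 0) := by
  induction xs generalizing m with
  | nil => simp; omega
  | cons x t ih =>
      have h1 := ih (max m x) (le_trans hm (le_max_left m x))
      have h2 := ih (max 0 x) (le_max_left 0 x)
      simp only [List.foldl_cons, h1, h2]
      omega

theorem foldl_max_le (xs : List Int) (m B : Int) (hm : m ≤ B)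
    (h : ∀ x ∈ xs, x ≤ B) : xs.foldl max m ≤ B := by
  induction xs generalizing m with
  | nil => simpa
  | cons x t ih =>
      refine ih (max m x) ?_ (fun y hy => h y (List.mem_cons_of_mem _ hy))
      have := h x (List.mem_cons_self ..)
      omega

theorem pvQual_le (row : List (Option String)) (x : Int) (hx : x ∈ pvQual row) :
    x ≤ (row.length : Int) := by
  unfold pvQual at hx
  rcases List.mem_filterMap.mp hx with ⟨p, hp, hfx⟩
  rcases (PySem.List.mem_enumerate_iff _ _ _).mp hp with ⟨k, hk, rfl⟩
  rcases h : row[k] with _ | s <;> simp [h] at hfx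
  · rcases hfx with ⟨-, rfl⟩
    omega

theorem pvLastA_eq (row : List (Option String)) (k : Nat) (hk : k ≤ row.length) :
    pvLastA row k = (pvQual (row.take k)).foldl max 0 := by
  induction k with
  | zero => simp [pvLastA, pvQual, PySem.List.enumerate_nil]
  | succ k ih =>
      have hklt : k < row.length := by omega
      have htake : row.take (k + 1) = row.take k ++ [row[k]] := by
        rw [List.take_add_one, List.getElem?_eq_getElem hklt]
        rfl
      have hlen : (row.take k).length = k := by
        rw [List.length_take]; omega
      have hq : pvQual (row.take (k + 1)) = pvQual (row.take k) ++
          (match row[k] with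
           | none => ([] : List Int)
           | some s => if PySem.Str.strip s == "" then [] else [(k : Int) + 1]) := by
        unfold pvQual
        rw [htake, PySem.List.enumerate_append, List.filterMap_append, hlen]
        congr 1
        rcases row[k] with _ | s
        · simp [PySem.List.enumerate_cons, PySem.List.enumerate_nil]
        · by_cases hss : PySem.Str.strip s = "" <;>
            simp [hss, PySem.List.enumerate_cons, PySem.List.enumerate_nil]
      have hbound : (pvQual (row.take k)).foldl max 0 ≤ (k : Int) := by
        refine foldl_max_le _ _ _ (by omega) (fun x hx => ?_)
        have := pvQual_le _ _ hx
        omega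
      have hcell : PySem.List.pyGetD row (((k : Int) + 1) - 1) none = row[k] := by
        have : ((k : Int) + 1) - 1 = ((k : Nat) : Int) := by ring
        rw [this]
        simp [PySem.List.pyGetD_natCast, List.getD_eq_getElem?_getD,
          List.getElem?_eq_getElem hklt]
      rw [hq, List.foldl_append]
      simp only [pvLastA]
      rw [hcell, ih (by omega)]
      rcases h : row[k] with _ | s
      · simp
      · by_cases hss : PySem.Str.strip s == ""
        · simp [hss]
        · simp [hss]
          omega

theorem outer_eq (rs : List (List (Option String))) (m : Int) (hm : 0 ≤ m) :
    rs.foldl (fun max_col row =>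
        let last := pvLastA row row.length
        if last > max_col then last else max_col) m
      = max m ((rs.flatMap pvQual).foldl max 0) := by
  induction rs generalizing m with
  | nil => simp; omega
  | cons r t ih =>
      have hA : pvLastA r r.length = (pvQual r).foldl max 0 := by
        simpa using pvLastA_eq r r.length (le_refl _)
      have hA0 : 0 ≤ pvLastA r r.length := by rw [hA]; exact le_foldl_max _ _
      simp only [List.foldl_cons, List.flatMap_cons, List.foldl_append]
      rw [ih _ (by split <;> omega)]
      rw [foldl_max_shift _ _ (le_foldl_max _ _), ← hA]
      split <;> omega

-- ===== VERDICT (by name: the statement is the Claim_ definition above) =====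
theorem detect_max_cols_py_spec : Claim_equal_detect_max_cols_py := by
  intro rows max_scan min_cols _
  unfold Spec_detect_max_cols_py
  simp only [detect_max_cols_py, detect_max_cols_py_alt]
  rw [outer_eq _ 0 (le_refl 0)]
  have := le_foldl_max ((PySem.List.slice rows none (some max_scan)).flatMap pvQual) 0
  split <;> omega
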